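-- pv_equiv track=rewrite | github.com/taofei95/quict | QuICT/optimization/alter_depth_decomposition/alter_depth_decomposition.py | binmaskcat
-- ===== SOURCE A (Python) =====
-- def binmaskcat(a1, a2, m, n):
--     res = 0
--     j = 0
--     k = 0
--     for i in range(n):
--         if (m & (1 << i)) != 0:
--             if (a1 & (1 << j)) != 0:
--                 res += (1 << i)
--             j = j + 1
--         else:
--             if (a2 & (1 << k)) != 0:
--                 res += (1 << i)
--             k = k + 1
--     return res
-- ===== SOURCE B (Python) =====
-- def binmaskcat(a1, a2, m, n):
--     # two-phase: precompute target position tables from the mask, then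
--     # scatter the low bits of a1 / a2 into those positions
--     set_pos = [i for i in range(n) if m & (1 << i)]
--     clr_pos = [i for i in range(n) if not (m & (1 << i))]
--     res = 0
--     for j, p in enumerate(set_pos):
--         if a1 & (1 << j):
--             res += 1 << p
--     for k, p in enumerate(clr_pos):
--         if a2 & (1 << k):
--             res += 1 << p
--     return res
-- ===== Notes on version B (the rewrite author's own statement) =====
-- stated objective: alternative
-- what changed: Replaces A's single position-driven pass with running source-bit counters by a two-phase scatter: first build the lists of mask-set and mask-clear positions, then iterate over the source bits of a1 and a2 and add each selected bit into its precomputed target position.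
import Mathlib
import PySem

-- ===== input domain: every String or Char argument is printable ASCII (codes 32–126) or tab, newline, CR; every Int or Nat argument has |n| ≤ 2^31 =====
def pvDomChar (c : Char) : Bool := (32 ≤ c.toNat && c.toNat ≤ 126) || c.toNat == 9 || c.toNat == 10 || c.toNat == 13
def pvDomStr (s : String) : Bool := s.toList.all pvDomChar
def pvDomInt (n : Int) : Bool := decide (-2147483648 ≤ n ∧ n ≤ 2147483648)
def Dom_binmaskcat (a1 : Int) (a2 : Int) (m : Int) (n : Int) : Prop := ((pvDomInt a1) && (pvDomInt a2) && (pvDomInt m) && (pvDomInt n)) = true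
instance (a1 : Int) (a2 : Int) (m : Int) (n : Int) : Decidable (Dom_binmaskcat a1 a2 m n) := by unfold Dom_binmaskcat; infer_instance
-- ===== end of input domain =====

-- B rebuilds A's interleaving pass as a two-phase scatter (mask-position tables, then source-bit loops); alternative decomposition, same cost.
-- (Int.shiftLeft a k is Python's a << k for k ≥ 0; every shift amount here is a loop index / counter ≥ 0, so .toNat is exact.)

-- ===== PORT A =====
def binmaskcat (a1 : Int) (a2 : Int) (m : Int) (n : Int) : Int :=
  (((PySem.List.pyRange 0 n 1).foldl (fun (s : Int × Int × Int) i =>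
      if PySem.Int.band m (Int.shiftLeft 1 i.toNat) ≠ 0 then
        ((if PySem.Int.band a1 (Int.shiftLeft 1 s.2.1.toNat) ≠ 0 then s.1 + Int.shiftLeft 1 i.toNat else s.1),
          s.2.1 + 1, s.2.2)
      else
        ((if PySem.Int.band a2 (Int.shiftLeft 1 s.2.2.toNat) ≠ 0 then s.1 + Int.shiftLeft 1 i.toNat else s.1),
          s.2.1, s.2.2 + 1))
    ((0 : Int), (0 : Int), (0 : Int)))).1

-- ===== PORT B =====
def binmaskcat_alt (a1 : Int) (a2 : Int) (m : Int) (n : Int) : Int :=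
  let rng := PySem.List.pyRange 0 n 1
  let set_pos := rng.filter (fun i => decide (PySem.Int.band m (Int.shiftLeft 1 i.toNat) ≠ 0))
  let clr_pos := rng.filter (fun i => !(decide (PySem.Int.band m (Int.shiftLeft 1 i.toNat) ≠ 0)))
  let res := (PySem.List.enumerate set_pos 0).foldl
    (fun r e => if PySem.Int.band a1 (Int.shiftLeft 1 e.1.toNat) ≠ 0 then r + Int.shiftLeft 1 e.2.toNat else r) 0
  (PySem.List.enumerate clr_pos 0).foldl
    (fun r e => if PySem.Int.band a2 (Int.shiftLeft 1 e.1.toNat) ≠ 0 then r + Int.shiftLeft 1 e.2.toNat else r) res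

-- ===== PRECONDITION & SPEC =====
def Spec_binmaskcat (a1 : Int) (a2 : Int) (m : Int) (n : Int) (out : Int) : Prop := out = binmaskcat_alt a1 a2 m n
instance (a1 : Int) (a2 : Int) (m : Int) (n : Int) (out : Int) : Decidable (Spec_binmaskcat a1 a2 m n out) := by unfold Spec_binmaskcat; infer_instance

-- ===== CLAIM (what is proved, stated in full; the proofs are below) =====
def Claim_equal_binmaskcat : Prop := ∀ (a1 : Int) (a2 : Int) (m : Int) (n : Int), Dom_binmaskcat a1 a2 m n → Spec_binmaskcat a1 a2 m n (binmaskcat a1 a2 m n)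

-- ===== LEMMAS AND PROOFS =====

-- B's scatter loop (the shape of both foldl's in binmaskcat_alt)
def pvScat (src : Int) (ps : List (Int × Int)) (res : Int) : Int :=
  ps.foldl (fun r e => if PySem.Int.band src (Int.shiftLeft 1 e.1.toNat) ≠ 0 then r + Int.shiftLeft 1 e.2.toNat else r) res

theorem pvScat_cons (src : Int) (e : Int × Int) (t : List (Int × Int)) (res : Int) :
    pvScat src (e :: t) res =
      pvScat src t (if PySem.Int.band src (Int.shiftLeft 1 e.1.toNat) ≠ 0 then res + Int.shiftLeft 1 e.2.toNat else res) := rfl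

theorem pvScat_add (src : Int) (ps : List (Int × Int)) (res c : Int) :
    pvScat src ps (res + c) = pvScat src ps res + c := by
  induction ps generalizing res with
  | nil => rfl
  | cons e t ih =>
    rw [pvScat_cons, pvScat_cons]
    split_ifs with h
    · rw [show res + c + Int.shiftLeft 1 e.2.toNat = res + Int.shiftLeft 1 e.2.toNat + c from by ring]
      exact ih _
    · exact ih _

theorem pvMain (a1 a2 m : Int) (l : List Int) (res j k : Int) :
    (l.foldl (fun (s : Int × Int × Int) i =>
      if PySem.Int.band m (Int.shiftLeft 1 i.toNat) ≠ 0 then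
        ((if PySem.Int.band a1 (Int.shiftLeft 1 s.2.1.toNat) ≠ 0 then s.1 + Int.shiftLeft 1 i.toNat else s.1),
          s.2.1 + 1, s.2.2)
      else
        ((if PySem.Int.band a2 (Int.shiftLeft 1 s.2.2.toNat) ≠ 0 then s.1 + Int.shiftLeft 1 i.toNat else s.1),
          s.2.1, s.2.2 + 1)) (res, j, k)).1
    = pvScat a2 (PySem.List.enumerate (l.filter (fun i => !(decide (PySem.Int.band m (Int.shiftLeft 1 i.toNat) ≠ 0)))) k)
        (pvScat a1 (PySem.List.enumerate (l.filter (fun i => decide (PySem.Int.band m (Int.shiftLeft 1 i.toNat) ≠ 0))) j) res) := by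
  induction l generalizing res j k with
  | nil => rfl
  | cons x t ih =>
    simp only [List.foldl_cons, List.filter_cons]
    by_cases hm : PySem.Int.band m (Int.shiftLeft 1 x.toNat) ≠ 0
    · rw [if_pos hm,
        if_pos (show (decide (PySem.Int.band m (Int.shiftLeft 1 x.toNat) ≠ 0)) = true from by simpa using hm),
        if_neg (show ¬((!decide (PySem.Int.band m (Int.shiftLeft 1 x.toNat) ≠ 0)) = true) from by simpa using hm)]
      rw [ih, PySem.List.enumerate_cons, pvScat_cons]
    · rw [if_neg hm,
        if_neg (show ¬((decide (PySem.Int.band m (Int.shiftLeft 1 x.toNat) ≠ 0)) = true) from by simpa using hm),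
        if_pos (show (!decide (PySem.Int.band m (Int.shiftLeft 1 x.toNat) ≠ 0)) = true from by simpa using hm)]
      rw [ih, PySem.List.enumerate_cons, pvScat_cons]
      by_cases h2 : PySem.Int.band a2 (Int.shiftLeft 1 k.toNat) ≠ 0
      · rw [if_pos h2, if_pos h2, pvScat_add]
      · rw [if_neg h2, if_neg h2]

-- ===== VERDICT (by name: the statement is the Claim_ definition above) =====
theorem binmaskcat_spec : Claim_equal_binmaskcat := by
  intro a1 a2 m n _
  show binmaskcat a1 a2 m n = binmaskcat_alt a1 a2 m n
  unfold binmaskcat binmaskcat_alt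
  exact pvMain a1 a2 m (PySem.List.pyRange 0 n 1) 0 0 0
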